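-- pv_equiv track=rewrite | github.com/pypi-data/pypi-mirror-386 | packages/qbittorrent-ark/qbittorrent_ark-0.1.4.tar.gz/qbittorrent_ark-0.1.4/qbittorrent_ark/common.py | compare_two_str_lists
-- ===== SOURCE A (Python) =====
-- def compare_two_str_lists(a: list[str], b: list[str], sorting: bool) -> bool:
--     if len(a) != len(b):
--         return False
--     else:
--         # return "".join(sorted(a)) == "".join(sorted(b))
--         if sorting:
--             a, b = sorted(a), sorted(b)
--         for i in range(len(a)):
--             if a[i] != b[i]:
--                 return False
--         return True
-- ===== SOURCE B (Python) =====
-- def compare_two_str_lists(a: list[str], b: list[str], sorting: bool) -> bool: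
--     if not sorting:
--         return a == b
--     ca = {}
--     for s in a:
--         ca[s] = ca.get(s, 0) + 1
--     cb = {}
--     for s in b:
--         cb[s] = cb.get(s, 0) + 1
--     return ca == cb
-- ===== Notes on version B (the rewrite author's own statement) =====
-- stated objective: alternative
-- what changed: The sorting path no longer sorts either list: B builds a hash count table (multiset) for each list and compares them as Python dicts, and the non-sorting path becomes a direct a == b instead of a length check plus an index loop.
import Mathlib
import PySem

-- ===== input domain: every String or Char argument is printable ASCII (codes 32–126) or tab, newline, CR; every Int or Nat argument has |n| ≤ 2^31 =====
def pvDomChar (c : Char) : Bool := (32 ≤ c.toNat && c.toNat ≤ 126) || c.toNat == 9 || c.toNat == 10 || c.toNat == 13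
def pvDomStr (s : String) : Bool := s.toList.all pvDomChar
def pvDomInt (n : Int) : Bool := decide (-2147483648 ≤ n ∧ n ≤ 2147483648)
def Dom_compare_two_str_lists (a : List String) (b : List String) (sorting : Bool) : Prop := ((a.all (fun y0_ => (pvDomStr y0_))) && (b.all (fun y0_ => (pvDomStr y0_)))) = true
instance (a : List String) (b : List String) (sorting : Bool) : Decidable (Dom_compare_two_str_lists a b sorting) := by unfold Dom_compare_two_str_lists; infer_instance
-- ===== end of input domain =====

-- B replaces A's sort-then-index-loop on the sorting path by two hash count tables compared as
-- multisets (Python dict ==), and the non-sorting path by a direct list equality; same result everywhere.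

-- ===== PORT A =====
-- the 'for i in range(len(a)): if a[i] != b[i]: return False' loop, with its early return
def pvLoopA (a b : List String) : List Int → Bool
  | [] => true
  | i :: is =>
      if PySem.List.pyGetD a i "" ≠ PySem.List.pyGetD b i "" then false
      else pvLoopA a b is

def compare_two_str_lists (a : List String) (b : List String) (sorting : Bool) : Bool :=
  if a.length ≠ b.length then false
  else
    let a' := if sorting then PySem.List.sorted a (fun x => x) else a
    let b' := if sorting then PySem.List.sorted b (fun x => x) else b
    pvLoopA a' b' (PySem.List.pyRange 0 (PySem.List.len a') 1)

-- ===== PORT B =====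
-- 'c = {}; for s in xs: c[s] = c.get(s, 0) + 1'
def pvCounterB (xs : List String) : PySem.Dict String Int :=
  xs.foldl (fun d s => d.insert s (d.getD s 0 + 1)) PySem.Dict.empty

-- Python dict '==' ignores insertion order: exact port per the PySem note (keys as a set + per-key lookup)
def pvDictEqB (d e : PySem.Dict String Int) : Bool :=
  PySem.Set.equal (PySem.Dict.keys d) (PySem.Dict.keys e) &&
    (PySem.Dict.keys d).all (fun k => PySem.Dict.get? d k == PySem.Dict.get? e k)

def compare_two_str_lists_alt (a : List String) (b : List String) (sorting : Bool) : Bool :=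
  if !sorting then a == b
  else pvDictEqB (pvCounterB a) (pvCounterB b)

-- ===== PRECONDITION & SPEC =====
def Spec_compare_two_str_lists (a : List String) (b : List String) (sorting : Bool) (out : Bool) : Prop := out = compare_two_str_lists_alt a b sorting
instance (a : List String) (b : List String) (sorting : Bool) (out : Bool) : Decidable (Spec_compare_two_str_lists a b sorting out) := by unfold Spec_compare_two_str_lists; infer_instance

-- ===== CLAIM (what is proved, stated in full; the proofs are below) =====
def Claim_equal_compare_two_str_lists : Prop := ∀ (a : List String) (b : List String) (sorting : Bool), Dom_compare_two_str_lists a b sorting → Spec_compare_two_str_lists a b sorting (compare_two_str_lists a b sorting)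

-- ===== LEMMAS AND PROOFS =====

theorem pvLoopA_eq_all (a b : List String) (is : List Int) :
    pvLoopA a b is = is.all (fun i => PySem.List.pyGetD a i "" == PySem.List.pyGetD b i "") := by
  induction is with
  | nil => rfl
  | cons i is ih =>
      simp only [pvLoopA, List.all_cons, ih]
      by_cases h : PySem.List.pyGetD a i "" = PySem.List.pyGetD b i "" <;> simp [h]

-- the index loop over two equal-length lists decides list equality
theorem pvLoopA_range_iff (a b : List String) (h : a.length = b.length) :
    pvLoopA a b (PySem.List.pyRange 0 (PySem.List.len a) 1) = true ↔ a = b := by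
  rw [pvLoopA_eq_all]
  simp only [PySem.List.len_eq, PySem.List.pyRange_zero_natCast, List.all_map, List.all_eq_true,
    List.mem_range, Function.comp, PySem.List.pyGetD_natCast, beq_iff_eq]
  constructor
  · intro hall
    apply List.ext_getElem h
    intro i h1 h2
    have := hall i h1
    rwa [List.getD_eq_getElem a "" h1, List.getD_eq_getElem b "" h2] at this
  · intro he i _
    rw [he]

theorem pvCounterB_eq (xs : List String) : pvCounterB xs = PySem.Dict.counter xs :=
  PySem.Dict.foldl_insert_getD_add_one_eq_counter xs

theorem get?_counter_of_mem (xs : List String) (k : String) (h : k ∈ xs) :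
    PySem.Dict.get? (PySem.Dict.counter xs) k = some ((xs.count k : Int)) := by
  cases hg : PySem.Dict.get? (PySem.Dict.counter xs) k with
  | none =>
      have := (PySem.Dict.get?_eq_none_iff_contains _ k).mp hg
      rw [PySem.Dict.contains_counter] at this
      simp at this
      exact absurd h this
  | some v =>
      have hd := PySem.Dict.getD_eq_get?_getD (PySem.Dict.counter xs) k (0 : Int)
      rw [PySem.Dict.getD_counter, hg] at hd
      simp at hd
      rw [hd]

-- what A's sorting/non-sorting result decides
theorem compare_true_iff (a b : List String) (sorting : Bool) :
    compare_two_str_lists a b sorting = true ↔ (if sorting then a.Perm b else a = b) := by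
  unfold compare_two_str_lists
  by_cases hlen : a.length = b.length
  · simp only [hlen, ne_eq, not_true_eq_false, if_false]
    cases sorting with
    | false =>
        simpa using pvLoopA_range_iff a b hlen
    | true =>
        simp only [if_true]
        rw [pvLoopA_range_iff _ _ (by rw [PySem.List.length_sorted, PySem.List.length_sorted, hlen])]
        exact PySem.List.sorted_id_eq_sorted_id_iff_perm a b
  · simp only [ne_eq, hlen, not_false_eq_true, if_true]
    cases sorting with
    | false => simp; intro h; exact absurd (congrArg List.length h) hlen
    | true =>
        simp only [if_true]
        constructor
        · intro h; exact absurd h (by simp)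
        · intro hp; exact absurd hp.length_eq hlen

-- what B decides: the counter comparison is multiset equality
theorem alt_true_iff (a b : List String) (sorting : Bool) :
    compare_two_str_lists_alt a b sorting = true ↔ (if sorting then a.Perm b else a = b) := by
  unfold compare_two_str_lists_alt
  cases sorting with
  | false => simp
  | true =>
      simp only [Bool.not_true, Bool.false_eq_true, if_false]
      unfold pvDictEqB
      rw [pvCounterB_eq, pvCounterB_eq]
      rw [Bool.and_eq_true, PySem.Set.equal_iff, List.all_eq_true]
      simp only [PySem.Dict.keys_counter, PySem.Set.mem_ofList]
      constructor
      · rintro ⟨hmem, hall⟩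
        rw [List.perm_iff_count]
        intro x
        by_cases hx : x ∈ a
        · have := hall x hx
          rw [get?_counter_of_mem a x hx, get?_counter_of_mem b x ((hmem x).mp hx)] at this
          simpa using this
        · have hxb : x ∉ b := fun hb => hx ((hmem x).mpr hb)
          rw [List.count_eq_zero_of_not_mem hx, List.count_eq_zero_of_not_mem hxb]
      · intro hp
        refine ⟨fun x => hp.mem_iff, fun k hk => ?_⟩
        rw [get?_counter_of_mem a k hk, get?_counter_of_mem b k (hp.mem_iff.mp hk)]
        simp [List.Perm.count_eq hp]

-- ===== VERDICT (by name: the statement is the Claim_ definition above) =====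
theorem compare_two_str_lists_spec : Claim_equal_compare_two_str_lists := by
  intro a b sorting _
  unfold Spec_compare_two_str_lists
  rw [Bool.eq_iff_iff, compare_true_iff, alt_true_iff]
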